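-- pv_equiv track=rewrite | github.com/lea-42/embedkit | src/docvec/extractors/openai_extractor.py | balanced_batches
-- ===== SOURCE A (Python) =====
-- def balanced_batches(page_count: int, min_size: int = 10, max_size: int = 15) -> list[tuple[int, int]]:
--     """Split page_count into evenly-sized batches between min_size and max_size.
--
--     Picks the number of batches that minimises size variance, then distributes
--     remainder pages one-at-a-time to the first batches so sizes differ by at most 1.
--     Returns list of (start, end) page ranges (0-based, end exclusive).
--     """
--     target_batches = max(1, round(page_count / ((min_size + max_size) / 2)))
--     base, remainder = divmod(page_count, target_batches)
--
--     # Clamp: if base size falls outside [min, max], nudge target_batches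
--     if base < min_size and target_batches > 1:
--         target_batches -= 1
--         base, remainder = divmod(page_count, target_batches)
--     elif base > max_size:
--         target_batches += 1
--         base, remainder = divmod(page_count, target_batches)
--
--     ranges: list[tuple[int, int]] = []
--     start = 0
--     for i in range(target_batches):
--         size = base + (1 if i < remainder else 0)
--         ranges.append((start, start + size))
--         start += size
--     return ranges
-- ===== SOURCE B (Python) =====
-- def balanced_batches(page_count: int, min_size: int = 10, max_size: int = 15) -> list[tuple[int, int]]:
--     """Same batching, computed by greedy splitting: after picking the (clamped)
--     number of batches, repeatedly peel off ceil(pages_left / batches_left) pages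
--     — no base/remainder bookkeeping in the construction at all."""
--     target_batches = max(1, round(page_count / ((min_size + max_size) / 2)))
--     base, _ = divmod(page_count, target_batches)
--
--     if base < min_size and target_batches > 1:
--         target_batches -= 1
--     elif base > max_size:
--         target_batches += 1
--
--     ranges: list[tuple[int, int]] = []
--     start, pages, batches = 0, page_count, target_batches
--     while batches > 0:
--         size = -(-pages // batches)  # ceiling division
--         ranges.append((start, start + size))
--         start, pages, batches = start + size, pages - size, batches - 1
--     return ranges
-- ===== Notes on version B (the rewrite author's own statement) =====
-- stated objective: alternative
-- what changed: The construction loop no longer uses base/remainder at all: after clamping the batch count, B greedily peels off ceil(pages_left / batches_left) pages per step, threading (start, pages, batches) instead of A's precomputed size base + (i < remainder).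
-- outside the precondition, e.g. on balanced_batches(25, -5, 5): A raises ZeroDivisionError, B raises ZeroDivisionError
import Mathlib
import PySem

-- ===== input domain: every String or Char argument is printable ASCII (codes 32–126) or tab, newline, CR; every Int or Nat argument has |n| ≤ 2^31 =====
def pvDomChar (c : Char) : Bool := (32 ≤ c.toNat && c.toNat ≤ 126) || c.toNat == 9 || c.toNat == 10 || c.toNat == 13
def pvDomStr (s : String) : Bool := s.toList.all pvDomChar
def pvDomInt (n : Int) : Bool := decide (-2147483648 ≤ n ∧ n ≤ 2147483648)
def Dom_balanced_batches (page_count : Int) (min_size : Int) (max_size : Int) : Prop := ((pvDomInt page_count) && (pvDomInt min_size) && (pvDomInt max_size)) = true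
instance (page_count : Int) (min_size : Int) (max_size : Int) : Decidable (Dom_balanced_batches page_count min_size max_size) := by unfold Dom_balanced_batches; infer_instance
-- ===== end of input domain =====

-- B builds the ranges by greedy ceiling-division splitting (peel off
-- ceil(pages_left/batches_left) pages per step) instead of A's base/remainder
-- loop (objective: alternative).

-- ===== PORT A =====
-- Exact integer model of Python's round(p / ((mn+mx)/2)) = round-half-even of the
-- rational (2a)/b with a = p, b = mn+mx: exact on Dom because |p| ≤ 2^31 < 2^52,
-- so the single correctly-rounded float division cannot move the quotient across
-- a half-integer it was not already equal to.
def pvRoundHalfEven (a b : Int) : Int :=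
  let a' := if b < 0 then -a else a
  let b' := if b < 0 then -b else b
  let n := PySem.Int.floordiv a' b'
  let r := a' - n * b'
  if 2 * r < b' then n
  else if b' < 2 * r then n + 1
  else if n % 2 = 0 then n else n + 1

-- A's clamp: nudge target_batches, recomputing base and remainder;
-- returns (target_batches, base, remainder)
def pvClamp (p mn mx tb0 : Int) : Int × Int × Int :=
  if PySem.Int.floordiv p tb0 < mn ∧ 1 < tb0 then
    (tb0 - 1, PySem.Int.floordiv p (tb0 - 1), PySem.Int.mod p (tb0 - 1))
  else if mx < PySem.Int.floordiv p tb0 then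
    (tb0 + 1, PySem.Int.floordiv p (tb0 + 1), PySem.Int.mod p (tb0 + 1))
  else
    (tb0, PySem.Int.floordiv p tb0, PySem.Int.mod p tb0)

-- A's accumulator loop: ranges + running start, sizes from base/remainder
def pvLoopA (base rem tb : Int) : List (Int × Int) :=
  ((PySem.List.pyRange 0 tb 1).foldl
    (fun (st : List (Int × Int) × Int) i =>
      let size := base + (if i < rem then 1 else 0)
      (st.1 ++ [(st.2, st.2 + size)], st.2 + size))
    ([], 0)).1

def balanced_batches (page_count : Int) (min_size : Int) (max_size : Int) : List (Int × Int) :=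
  let tb0 := max 1 (pvRoundHalfEven (2 * page_count) (min_size + max_size))
  let c := pvClamp page_count min_size max_size tb0
  pvLoopA c.2.1 c.2.2 c.1

-- ===== PORT B =====
-- B's while loop: peel off ceil(pages/batches) pages per step
def pvSplitGo (ranges : List (Int × Int)) (start pages batches : Int) : List (Int × Int) :=
  if h : batches ≤ 0 then ranges
  else
    let size := -(PySem.Int.floordiv (-pages) batches)
    pvSplitGo (ranges ++ [(start, start + size)]) (start + size) (pages - size) (batches - 1)
termination_by batches.toNat
decreasing_by omega

def balanced_batches_alt (page_count : Int) (min_size : Int) (max_size : Int) : List (Int × Int) :=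
  let tb0 := max 1 (pvRoundHalfEven (2 * page_count) (min_size + max_size))
  let base := PySem.Int.floordiv page_count tb0
  let tb :=
    if base < min_size ∧ 1 < tb0 then tb0 - 1
    else if max_size < base then tb0 + 1
    else tb0
  pvSplitGo [] 0 page_count tb

-- ===== PRECONDITION & SPEC =====
-- Pre_ excludes only min_size + max_size = 0, where A raises ZeroDivisionError.
def Pre_balanced_batches (page_count : Int) (min_size : Int) (max_size : Int) : Prop :=
  min_size + max_size ≠ 0
instance (page_count : Int) (min_size : Int) (max_size : Int) : Decidable (Pre_balanced_batches page_count min_size max_size) := by unfold Pre_balanced_batches; infer_instance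
def pvWitness_balanced_batches : Int × Int × Int := (100, 10, 15)

def Spec_balanced_batches (page_count : Int) (min_size : Int) (max_size : Int) (out : List (Int × Int)) : Prop := out = balanced_batches_alt page_count min_size max_size
instance (page_count : Int) (min_size : Int) (max_size : Int) (out : List (Int × Int)) : Decidable (Spec_balanced_batches page_count min_size max_size out) := by unfold Spec_balanced_batches; infer_instance

-- ===== CLAIM (what is proved, stated in full; the proofs are below) =====
def Claim_equal_balanced_batches : Prop := ∀ (page_count : Int) (min_size : Int) (max_size : Int), Dom_balanced_batches page_count min_size max_size → Pre_balanced_batches page_count min_size max_size → Spec_balanced_batches page_count min_size max_size (balanced_batches page_count min_size max_size)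

-- ===== LEMMAS AND PROOFS =====

-- the common closed form both loops are reduced to
def pvForm (s base rem : Int) (i : Int) : Int × Int :=
  (s + i * base + min i rem, s + (i + 1) * base + min (i + 1) rem)

-- A's loop invariant: after n iterations, ranges = the closed-form map and
-- start = n*base + min n rem
lemma pvLoop_aux (base rem : Int) (hrem : 0 ≤ rem) (n : Nat) :
    (PySem.List.pyRange 0 (n : Int) 1).foldl
      (fun (st : List (Int × Int) × Int) i =>
        let size := base + (if i < rem then 1 else 0)
        (st.1 ++ [(st.2, st.2 + size)], st.2 + size))
      ([], 0)
    = ((PySem.List.pyRange 0 (n : Int) 1).map (pvForm 0 base rem),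
       (n : Int) * base + min (n : Int) rem) := by
  induction n with
  | zero =>
    simp [PySem.List.pyRange_one_eq_nil (by omega : (0:Int) ≤ 0)]
    omega
  | succ n ih =>
    have h : ((n + 1 : Nat) : Int) = (n : Int) + 1 := by push_cast; ring
    rw [h, PySem.List.pyRange_one_succ_right (by positivity), List.foldl_append, List.map_append, ih]
    simp only [List.foldl_cons, List.foldl_nil, List.map_cons, List.map_nil, pvForm]
    have e : (n : Int) * base + min (n : Int) rem + (base + if (n : Int) < rem then 1 else 0)
        = ((n : Int) + 1) * base + min ((n : Int) + 1) rem := by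
      rw [add_mul, one_mul]
      by_cases hc : (n : Int) < rem <;> simp only [hc, if_true, if_false] <;> omega
    simp only [Prod.mk.injEq, zero_add]
    exact ⟨by rw [e], e⟩

lemma pyRange_one_shift (n : Int) :
    PySem.List.pyRange 1 (n + 1) 1 = (PySem.List.pyRange 0 n 1).map (· + 1) := by
  rw [PySem.List.pyRange_one, PySem.List.pyRange_one, List.map_map]
  have : (n + 1 - 1).toNat = (n - 0).toNat := by omega
  rw [this]
  apply List.map_congr_left
  intro k _
  simp
  omega

-- one greedy step: ceil((m*base+rem)/m) = base + (1 if rem > 0 else 0)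
lemma pvCeil_step (base rem m : Int) (hm : 0 < m) (h0 : 0 ≤ rem) (h1 : rem ≤ m) :
    -(PySem.Int.floordiv (-(m * base + rem)) m) = base + (if 0 < rem then 1 else 0) := by
  rw [PySem.Int.neg_floordiv_neg_eq_iff_of_pos]
  · by_cases hr : 0 < rem <;> simp only [hr, if_true, if_false] <;>
      constructor <;> ring_nf <;> nlinarith
  · exact hm

-- B's greedy loop equals the closed form, for any start offset
lemma pvSplit_eq (base : Int) (n : Nat) : ∀ (acc : List (Int × Int)) (s rem : Int),
    0 ≤ rem → rem ≤ (n : Int) →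
    pvSplitGo acc s ((n : Int) * base + rem) (n : Int)
      = acc ++ (PySem.List.pyRange 0 (n : Int) 1).map (pvForm s base rem) := by
  induction n with
  | zero =>
    intro acc s rem _ _
    rw [pvSplitGo]
    simp [PySem.List.pyRange_one_eq_nil (by omega : (0:Int) ≤ 0)]
  | succ n ih =>
    intro acc s rem h0 h1
    have hc : ((n + 1 : Nat) : Int) = (n : Int) + 1 := by push_cast; ring
    rw [hc] at h1 ⊢
    rw [pvSplitGo]
    have hpos : ¬ ((n : Int) + 1 ≤ 0) := by omega
    simp only [hpos, dif_neg, not_false_iff]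
    have hsize : -(PySem.Int.floordiv (-(((n : Int) + 1) * base + rem)) ((n : Int) + 1))
        = base + (if 0 < rem then 1 else 0) := pvCeil_step base rem _ (by omega) h0 h1
    rw [hsize]
    set ind : Int := if 0 < rem then 1 else 0 with hind
    have hindb : (0 < rem ∧ ind = 1) ∨ (rem = 0 ∧ ind = 0) := by
      by_cases hr : 0 < rem
      · exact Or.inl ⟨hr, by simp [hind, hr]⟩
      · exact Or.inr ⟨by omega, by simp [hind, hr]⟩
    have hpages : ((n : Int) + 1) * base + rem - (base + ind) = (n : Int) * base + (rem - ind) := by ring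
    have hbat : (n : Int) + 1 - 1 = (n : Int) := by ring
    rw [hpages, hbat, ih (acc ++ [(s, s + (base + ind))]) (s + (base + ind)) (rem - ind)
      (by rcases hindb with ⟨h, hi⟩ | ⟨h, hi⟩ <;> omega)
      (by rcases hindb with ⟨h, hi⟩ | ⟨h, hi⟩ <;> omega)]
    rw [List.append_assoc]
    congr 1
    rw [PySem.List.pyRange_one_cons (by omega : (0:Int) < (n : Int) + 1), List.map_cons]
    have hhead : pvForm s base rem 0 = (s, s + (base + ind)) := by
      simp only [pvForm, Prod.mk.injEq]
      refine ⟨?_, ?_⟩ <;> rcases hindb with ⟨h, hi⟩ | ⟨h, hi⟩ <;> omega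
    rw [hhead]
    simp only [List.cons_append, List.nil_append]
    congr 1
    rw [show (0 : Int) + 1 = 1 from by ring, pyRange_one_shift]
    simp only [List.map_map]
    apply List.map_congr_left
    intro i hi
    have hi0 : 0 ≤ i := (PySem.List.mem_pyRange_one.mp hi).1
    simp only [Function.comp, pvForm, Prod.mk.injEq]
    have e1 : min (i + 1) rem = ind + min i (rem - ind) := by
      rcases hindb with ⟨h, hi'⟩ | ⟨h, hi'⟩ <;> omega
    have e2 : min (i + 1 + 1) rem = ind + min (i + 1) (rem - ind) := by
      rcases hindb with ⟨h, hi'⟩ | ⟨h, hi'⟩ <;> omega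
    refine ⟨by rw [e1]; ring, by rw [e2]; ring⟩

-- in every clamp branch the divisor equals the returned target_batches ≥ 1,
-- so the remainder is a Python mod with 0 ≤ rem < tb
lemma pvClamp_fields (p mn mx tb0 : Int) (h : 1 ≤ tb0) :
    (pvClamp p mn mx tb0).2.1 = PySem.Int.floordiv p (pvClamp p mn mx tb0).1 ∧
    (pvClamp p mn mx tb0).2.2 = PySem.Int.mod p (pvClamp p mn mx tb0).1 ∧
    1 ≤ (pvClamp p mn mx tb0).1 := by
  unfold pvClamp
  split_ifs with h1 h2 <;> exact ⟨rfl, rfl, by omega⟩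

-- B's clamp (batches only) agrees with A's clamp's batch count
lemma pvClamp_fst (p mn mx tb0 : Int) :
    (if PySem.Int.floordiv p tb0 < mn ∧ 1 < tb0 then tb0 - 1
     else if mx < PySem.Int.floordiv p tb0 then tb0 + 1 else tb0)
    = (pvClamp p mn mx tb0).1 := by
  unfold pvClamp
  split_ifs <;> rfl

-- ===== VERDICT (by name: the statement is the Claim_ definition above) =====
theorem balanced_batches_spec : Claim_equal_balanced_batches := by
  intro p mn mx _ _
  unfold Spec_balanced_batches balanced_batches balanced_batches_alt
  simp only []
  rw [pvClamp_fst p mn mx]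
  set tb0 := max 1 (pvRoundHalfEven (2 * p) (mn + mx)) with htb0
  obtain ⟨hb, hr, htb⟩ := pvClamp_fields p mn mx tb0 (le_max_left 1 _)
  set tb := (pvClamp p mn mx tb0).1 with htb'
  set base := (pvClamp p mn mx tb0).2.1 with hbase
  set rem := (pvClamp p mn mx tb0).2.2 with hrem
  have hpos : 0 < tb := by omega
  have hr0 : 0 ≤ rem := by
    rw [hr, PySem.Int.mod_eq_emod_of_pos hpos]
    exact Int.emod_nonneg p (by omega)
  have hrlt : rem < tb := by
    rw [hr, PySem.Int.mod_eq_emod_of_pos hpos]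
    exact Int.emod_lt_of_pos p hpos
  have hdecomp : p = tb * base + rem := by
    have h := PySem.Int.floordiv_mul_add_mod p tb
    rw [hb, hr]
    linarith [h]
  have hn : tb = ((tb.toNat : Nat) : Int) := by omega
  have hB : pvSplitGo [] 0 p tb = (PySem.List.pyRange 0 tb 1).map (pvForm 0 base rem) := by
    have h := pvSplit_eq base tb.toNat [] 0 rem hr0 (by omega)
    rw [← hn, ← hdecomp] at h
    simpa using h
  have hA : pvLoopA base rem tb = (PySem.List.pyRange 0 tb 1).map (pvForm 0 base rem) := by
    rw [pvLoopA, hn, pvLoop_aux base rem hr0 tb.toNat]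
  rw [hA, hB]
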